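-- pv_equiv track=rewrite | github.com/manzlerh/MMA-Grid | data/enrich_fighters.py | strip_wikilinks
-- ===== SOURCE A (Python) =====
-- def strip_wikilinks(text: str) -> str:
--     """Convert [[X]], [[X|Y]] to Y or X."""
--     text = (text or "").strip()
--     # [[Display|Link]] or [[Link]]
--     out = []
--     i = 0
--     while i < len(text):
--         if text[i : i + 2] == "[[":
--             end = text.find("]]", i + 2)
--             if end == -1:
--                 out.append(text[i])
--                 i += 1
--                 continue
--             inner = text[i + 2 : end]
--             if "|" in inner:
--                 out.append(inner.split("|", 1)[1].strip())
--             else: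
--                 out.append(inner.strip())
--             i = end + 2
--             continue
--         out.append(text[i])
--         i += 1
--     return "".join(out).strip()
-- ===== SOURCE B (Python) =====
-- def strip_wikilinks(text: str) -> str:
--     """Convert [[X]], [[X|Y]] to Y or X."""
--     text = (text or "").strip()
--     out = []
--     pos = 0
--     while pos < len(text):
--         start = text.find("[[", pos)
--         if start == -1:
--             out.append(text[pos:])
--             break
--         end = text.find("]]", start + 2)
--         if end == -1:
--             # no closing marker anywhere further on: the rest is literal text
--             out.append(text[pos:])
--             break
--         inner = text[start + 2 : end]
--         if "|" in inner:
--             repl = inner.split("|", 1)[1].strip()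
--         else:
--             repl = inner.strip()
--         out.append(text[pos:start])
--         out.append(repl)
--         pos = end + 2
--     return "".join(out).strip()
-- ===== Notes on version B (the rewrite author's own statement) =====
-- stated objective: faster
-- what changed: A scans character by character, appending one char at a time and re-searching for the closing marker at every opening marker; B jumps with str.find over the text, copies whole chunks between links by slicing, and emits the entire remaining text as soon as either marker is absent.
import Mathlib
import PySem

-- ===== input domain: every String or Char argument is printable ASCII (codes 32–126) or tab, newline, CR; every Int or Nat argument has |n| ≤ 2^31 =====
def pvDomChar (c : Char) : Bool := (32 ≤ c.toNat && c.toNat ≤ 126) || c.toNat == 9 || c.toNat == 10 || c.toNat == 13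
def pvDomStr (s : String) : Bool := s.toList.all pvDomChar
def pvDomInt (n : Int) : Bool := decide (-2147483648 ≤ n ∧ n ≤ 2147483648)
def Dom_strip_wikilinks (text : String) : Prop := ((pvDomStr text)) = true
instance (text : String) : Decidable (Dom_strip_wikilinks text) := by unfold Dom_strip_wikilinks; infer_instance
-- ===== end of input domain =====

-- B replaces A's character-by-character scan by find-jumps that copy whole chunks between links; objective: faster (constant-factor in Python), same return value.

-- shared helper: both Pythons contain the identical expression
--   inner.split("|", 1)[1].strip() if "|" in inner else inner.strip()
def pvProcInner (inner : List Char) : List Char :=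
  if PySem.Chars.isIn ['|'] inner then
    PySem.Chars.strip ((PySem.Chars.splitOnMax inner ['|'] 1).getD 1 [])
  else
    PySem.Chars.strip inner

-- ===== PORT A =====
-- A's while-loop over index i, transcribed as recursion on the suffix text[i:]
def pvLoopA (s : List Char) : List Char :=
  match s with
  | [] => []
  | c :: rest =>
    if (c :: rest).take 2 = ['[', '['] then
      -- end = text.find("]]", i + 2), relative to the suffix after "[["
      if PySem.Chars.find ((c :: rest).drop 2) [']', ']'] = -1 then
        c :: pvLoopA rest
      else
        pvProcInner (((c :: rest).drop 2).take (PySem.Chars.find ((c :: rest).drop 2) [']', ']']).toNat) ++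
          pvLoopA (((c :: rest).drop 2).drop ((PySem.Chars.find ((c :: rest).drop 2) [']', ']']).toNat + 2))
    else
      c :: pvLoopA rest
termination_by s.length
decreasing_by
  · simp
  · simp [List.length_drop]
  · simp

def strip_wikilinks (text : String) : String :=
  String.ofList (PySem.Chars.strip (pvLoopA (PySem.Chars.strip text.toList)))

-- ===== PORT B =====
-- B's while-loop over pos with text.find("[[", pos) / text.find("]]", start+2),
-- transcribed as recursion on the suffix text[pos:]
def pvLoopB (s : List Char) : List Char :=
  if _hj : PySem.Chars.find s ['[', '['] = -1 then
    s
  else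
    if PySem.Chars.find (s.drop ((PySem.Chars.find s ['[', '[']).toNat + 2)) [']', ']'] = -1 then
      s
    else
      s.take (PySem.Chars.find s ['[', '[']).toNat ++
        pvProcInner ((s.drop ((PySem.Chars.find s ['[', '[']).toNat + 2)).take
          (PySem.Chars.find (s.drop ((PySem.Chars.find s ['[', '[']).toNat + 2)) [']', ']']).toNat) ++
        pvLoopB ((s.drop ((PySem.Chars.find s ['[', '[']).toNat + 2)).drop
          ((PySem.Chars.find (s.drop ((PySem.Chars.find s ['[', '[']).toNat + 2)) [']', ']']).toNat + 2))
termination_by s.length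
decreasing_by
  have h0 : 0 ≤ PySem.Chars.find s ['[', '['] := by
    have := PySem.Chars.neg_one_le_find s ['[', '[']; omega
  have hin : ['[', '['] <:+: s := (PySem.Chars.find_nonneg_iff _ _).1 h0
  have hl : 2 ≤ s.length := hin.length_le
  simp [List.length_drop]; omega

def strip_wikilinks_alt (text : String) : String :=
  String.ofList (PySem.Chars.strip (pvLoopB (PySem.Chars.strip text.toList)))

-- ===== PRECONDITION & SPEC =====
def Spec_strip_wikilinks (text : String) (out : String) : Prop := out = strip_wikilinks_alt text
instance (text : String) (out : String) : Decidable (Spec_strip_wikilinks text out) := by unfold Spec_strip_wikilinks; infer_instance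

-- ===== CLAIM (what is proved, stated in full; the proofs are below) =====
def Claim_equal_strip_wikilinks : Prop := ∀ (text : String), Dom_strip_wikilinks text → Spec_strip_wikilinks text (strip_wikilinks text)

-- ===== LEMMAS AND PROOFS =====

-- u.take 2 = "[[" says exactly that "[[" is a prefix of u
theorem pv_take2_iff (u : List Char) : u.take 2 = ['[', '['] ↔ ['[', '['] <+: u := by
  rw [List.prefix_iff_eq_take]
  constructor <;> intro h <;> exact h.symm

-- find points at k as soon as sub occurs at k and nowhere earlier
theorem pv_find_eq_of (s sub : List Char) (k : Nat)
    (h1 : sub <+: s.drop k) (h2 : ∀ i < k, ¬ sub <+: s.drop i) :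
    PySem.Chars.find s sub = (k : Int) := by
  have hin : sub <:+: s := by
    rw [← PySem.Chars.isIn_iff_infix, ← PySem.Chars.exists_prefix_drop_iff_isIn]
    exact ⟨k, h1⟩
  have h0 : 0 ≤ PySem.Chars.find s sub := (PySem.Chars.find_nonneg_iff _ _).2 hin
  obtain ⟨hp, hmin⟩ := PySem.Chars.find_spec h0
  have hk : (PySem.Chars.find s sub).toNat = k := by
    rcases Nat.lt_trichotomy (PySem.Chars.find s sub).toNat k with h | h | h
    · exact absurd hp (h2 _ h)
    · exact h
    · exact absurd h1 (hmin _ h)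
  omega

-- A's scan copies the text verbatim when no "[[ … ]]" ever closes
theorem pvLoopA_literal (s : List Char)
    (H : ∀ q, ['[', '['] <+: s.drop q → ¬ ([']', ']'] <:+: s.drop (q + 2))) :
    pvLoopA s = s := by
  fun_induction pvLoopA s with
  | case1 => rfl
  | case2 c rest h he ih =>
    have : pvLoopA rest = rest := by
      apply ih
      intro q hq
      have := H (q + 1) (by simpa using hq)
      simpa using this
    rw [this]
  | case3 c rest h he =>
    exfalso
    have hpre : ['[', '['] <+: (c :: rest) := (pv_take2_iff _).1 h
    have hno := H 0 (by simpa using hpre)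
    exact he (by simpa using (PySem.Chars.find_eq_neg_one_iff _ _).2 hno)
  | case4 c rest h ih =>
    have : pvLoopA rest = rest := by
      apply ih
      intro q hq
      have := H (q + 1) (by simpa using hq)
      simpa using this
    rw [this]

-- A copies verbatim up to the first "[["
theorem pvLoopA_skip (j : Nat) : ∀ s : List Char,
    PySem.Chars.find s ['[', '['] = (j : Int) →
    pvLoopA s = s.take j ++ pvLoopA (s.drop j) := by
  induction j with
  | zero => intro s _; simp
  | succ j ih =>
    intro s hf
    have h0 : 0 ≤ PySem.Chars.find s ['[', '['] := by rw [hf]; positivity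
    obtain ⟨hp, hmin⟩ := PySem.Chars.find_spec h0
    rw [hf] at hp hmin
    simp only [Int.toNat_natCast] at hp hmin
    match s with
    | [] => simp at hp
    | c :: rest =>
      have hne : ¬ (c :: rest).take 2 = ['[', '['] := by
        rw [pv_take2_iff]
        exact hmin 0 (Nat.succ_pos j)
      have hstep : pvLoopA (c :: rest) = c :: pvLoopA rest := by
        rw [pvLoopA, if_neg hne]
      have hfr : PySem.Chars.find rest ['[', '['] = (j : Int) := by
        apply pv_find_eq_of
        · simpa using hp
        · intro i hi
          have := hmin (i + 1) (by omega)
          simpa using this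
      rw [hstep, ih rest hfr]
      simp

-- A's step across one closed link
theorem pvLoopA_open (c : Char) (rest : List Char)
    (h : (c :: rest).take 2 = ['[', '[']) (e : Nat)
    (he : PySem.Chars.find ((c :: rest).drop 2) [']', ']'] = (e : Int)) :
    pvLoopA (c :: rest) =
      pvProcInner (((c :: rest).drop 2).take e) ++
        pvLoopA (((c :: rest).drop 2).drop (e + 2)) := by
  have hne : PySem.Chars.find ((c :: rest).drop 2) [']', ']'] ≠ -1 := by
    rw [he]; omega
  rw [pvLoopA]
  rw [if_pos h, if_neg hne, he]
  simp

-- the two loops agree everywhere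
theorem pv_loop_eq (s : List Char) : pvLoopA s = pvLoopB s := by
  fun_induction pvLoopB s with
  | case1 s hj =>
    apply pvLoopA_literal
    intro q hq
    exfalso
    have hin : ['[', '['] <:+: s := by
      rw [← PySem.Chars.isIn_iff_infix, ← PySem.Chars.exists_prefix_drop_iff_isIn]
      exact ⟨q, hq⟩
    exact ((PySem.Chars.find_eq_neg_one_iff _ _).1 hj) hin
  | case2 s hj he =>
    have h0 : 0 ≤ PySem.Chars.find s ['[', '['] := by
      have := PySem.Chars.neg_one_le_find s ['[', '[']; omega
    obtain ⟨hp, hmin⟩ := PySem.Chars.find_spec h0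
    apply pvLoopA_literal
    intro q hq hcl
    have hqj : (PySem.Chars.find s ['[', '[']).toNat ≤ q := by
      by_contra hlt
      exact hmin q (by omega) hq
    have hsuf : s.drop (q + 2) <:+ s.drop ((PySem.Chars.find s ['[', '[']).toNat + 2) := by
      have : s.drop (q + 2) =
          (s.drop ((PySem.Chars.find s ['[', '[']).toNat + 2)).drop
            (q - (PySem.Chars.find s ['[', '[']).toNat) := by
        rw [List.drop_drop]; congr 1; omega
      rw [this]
      exact List.drop_suffix _ _
    have : [']', ']'] <:+: s.drop ((PySem.Chars.find s ['[', '[']).toNat + 2) :=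
      hcl.trans hsuf.isInfix
    exact ((PySem.Chars.find_eq_neg_one_iff _ _).1 he) this
  | case3 s hj he ih =>
    have h0 : 0 ≤ PySem.Chars.find s ['[', '['] := by
      have := PySem.Chars.neg_one_le_find s ['[', '[']; omega
    obtain ⟨hp, hmin⟩ := PySem.Chars.find_spec h0
    have hfj : PySem.Chars.find s ['[', '['] = ((PySem.Chars.find s ['[', '[']).toNat : Int) := by
      omega
    have hskip := pvLoopA_skip (PySem.Chars.find s ['[', '[']).toNat s hfj
    -- the suffix at the link start is nonempty
    have hlen : 2 ≤ (s.drop (PySem.Chars.find s ['[', '[']).toNat).length := hp.length_le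
    obtain ⟨c, rest, hcr⟩ :=
      List.exists_cons_of_ne_nil (l := s.drop (PySem.Chars.find s ['[', '[']).toNat)
        (by intro h; rw [h] at hlen; simp at hlen)
    have htk : (c :: rest).take 2 = ['[', '['] := by
      rw [pv_take2_iff, ← hcr]; exact hp
    have hdd : (c :: rest).drop 2 = s.drop ((PySem.Chars.find s ['[', '[']).toNat + 2) := by
      rw [← hcr, List.drop_drop]
    have h0e : 0 ≤ PySem.Chars.find (s.drop ((PySem.Chars.find s ['[', '[']).toNat + 2)) [']', ']'] := by
      have := PySem.Chars.neg_one_le_find (s.drop ((PySem.Chars.find s ['[', '[']).toNat + 2)) [']', ']']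
      omega
    have hfe : PySem.Chars.find ((c :: rest).drop 2) [']', ']'] =
        ((PySem.Chars.find (s.drop ((PySem.Chars.find s ['[', '[']).toNat + 2)) [']', ']']).toNat : Int) := by
      rw [hdd]; omega
    have hopen := pvLoopA_open c rest htk _ hfe
    rw [hskip, hcr, hopen, hdd, ih]
    simp [List.append_assoc]

-- ===== VERDICT (by name: the statement is the Claim_ definition above) =====
theorem strip_wikilinks_spec : Claim_equal_strip_wikilinks := by
  intro text _
  unfold Spec_strip_wikilinks strip_wikilinks strip_wikilinks_alt
  rw [pv_loop_eq]
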